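-- pv_equiv track=rewrite | github.com/kirilenkobm/CURIA_pipeline | modules/pipeline/reference_islands_scanner.py | _map_spliced_to_genomic
-- ===== SOURCE A (Python) =====
-- from typing import Dict, List, Tuple
--
-- def _map_spliced_to_genomic(
--     exon_blocks: List[Tuple[int, int]],
--     strand: int,
--     spliced_start: int,
--     spliced_end: int,
-- ) -> List[Tuple[int, int]]:
--     """
--     Map spliced coordinates to genomic segments.
--     Returns list of (genomic_start, genomic_end) tuples.
--     """
--     segments = []
--     offset = 0
--
--     for g_start, g_end in exon_blocks:
--         exon_len = g_end - g_start
--         a = max(spliced_start, offset)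
--         b = min(spliced_end, offset + exon_len)
--
--         if a < b:
--             exon_off_a = a - offset
--             exon_off_b = b - offset
--
--             if strand == -1:
--                 seg_end = g_end - exon_off_a
--                 seg_start = g_end - exon_off_b
--             else:
--                 seg_start = g_start + exon_off_a
--                 seg_end = g_start + exon_off_b
--
--             segments.append((seg_start, seg_end))
--
--         offset += exon_len
--         if offset >= spliced_end:
--             break
--
--     return segments
-- ===== SOURCE B (Python) =====
-- def _map_spliced_to_genomic(exon_blocks, strand, spliced_start, spliced_end):
--     # Divide and conquer: each half of the exon list reports a triple
--     # (segments, stopped, spliced length); halves combine by offsetting the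
--     # right half by the left's length and discarding the right half entirely
--     # when the left half already reached spliced_end.
--     def solve(blocks, off):
--         if not blocks:
--             return [], False, 0
--         if len(blocks) == 1:
--             g_start, g_end = blocks[0]
--             exon_len = g_end - g_start
--             a = max(spliced_start, off)
--             b = min(spliced_end, off + exon_len)
--             segs = []
--             if a < b:
--                 if strand == -1:
--                     segs = [(g_end - (b - off), g_end - (a - off))]
--                 else:
--                     segs = [(g_start + (a - off), g_start + (b - off))]
--             return segs, off + exon_len >= spliced_end, exon_len
--         mid = len(blocks) // 2
--         lsegs, lstop, llen = solve(blocks[:mid], off)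
--         if lstop:
--             return lsegs, True, llen
--         rsegs, rstop, rlen = solve(blocks[mid:], off + llen)
--         return lsegs + rsegs, rstop, llen + rlen
--
--     return solve(exon_blocks, 0)[0]
-- ===== Notes on version B (the rewrite author's own statement) =====
-- stated objective: alternative
-- what changed: Replaces A's linear scan with a running offset and early break by a divide-and-conquer recursion that splits the exon list in half and combines (segments, stopped-flag, spliced-length) triples, discarding the right half when the left half already reached spliced_end.
import Mathlib
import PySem

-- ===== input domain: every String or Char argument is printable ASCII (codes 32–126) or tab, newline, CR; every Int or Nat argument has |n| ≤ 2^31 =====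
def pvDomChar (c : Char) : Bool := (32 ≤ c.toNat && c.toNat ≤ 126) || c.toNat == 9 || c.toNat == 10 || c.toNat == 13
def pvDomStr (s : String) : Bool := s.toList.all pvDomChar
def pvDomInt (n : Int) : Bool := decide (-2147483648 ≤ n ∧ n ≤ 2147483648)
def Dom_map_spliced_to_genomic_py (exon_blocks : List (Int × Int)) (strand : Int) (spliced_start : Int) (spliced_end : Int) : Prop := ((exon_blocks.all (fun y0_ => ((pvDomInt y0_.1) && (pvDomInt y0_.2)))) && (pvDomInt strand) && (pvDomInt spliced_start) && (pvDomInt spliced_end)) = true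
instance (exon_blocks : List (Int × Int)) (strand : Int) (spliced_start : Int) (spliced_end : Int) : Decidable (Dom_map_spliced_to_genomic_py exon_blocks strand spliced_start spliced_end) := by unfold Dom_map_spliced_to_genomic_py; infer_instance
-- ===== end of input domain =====

-- B replaces A's running-offset linear scan with a divide-and-conquer recursion that
-- splits the exon list in half and combines (segments, stopped, length) triples
-- (objective: alternative decomposition, same cost).

-- ===== PORT A =====
-- A's single loop: running offset, append to segments, early break once
-- offset >= spliced_end.  'seg ++ …' is segments.append of the optional segment.
def mapSplicedLoopA : List (Int × Int) → Int → Int → Int → Int → List (Int × Int)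
  | [], _, _, _, _ => []
  | (g_start, g_end) :: rest, strand, ss, se, offset =>
      let exon_len := g_end - g_start
      let a := max ss offset
      let b := min se (offset + exon_len)
      let seg : List (Int × Int) :=
        if a < b then
          if strand = -1 then [(g_end - (b - offset), g_end - (a - offset))]
          else [(g_start + (a - offset), g_start + (b - offset))]
        else []
      if se ≤ offset + exon_len then seg
      else seg ++ mapSplicedLoopA rest strand ss se (offset + exon_len)

def map_spliced_to_genomic_py (exon_blocks : List (Int × Int)) (strand : Int) (spliced_start : Int) (spliced_end : Int) : List (Int × Int) :=
  mapSplicedLoopA exon_blocks strand spliced_start spliced_end 0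

-- ===== PORT B =====
-- Source B's 'solve': divide and conquer on the exon list, returning
-- (segments, stopped, spliced length); blocks[:mid] / blocks[mid:] are take/drop.
def solveB (strand ss se : Int) : List (Int × Int) → Int → List (Int × Int) × Bool × Int
  | [], _ => ([], false, 0)
  | [(g_start, g_end)], off =>
      let exon_len := g_end - g_start
      let a := max ss off
      let b := min se (off + exon_len)
      let segs : List (Int × Int) :=
        if a < b then
          if strand = -1 then [(g_end - (b - off), g_end - (a - off))]
          else [(g_start + (a - off), g_start + (b - off))]
        else []
      (segs, decide (se ≤ off + exon_len), exon_len)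
  | p :: q :: rest, off =>
      let blocks := p :: q :: rest
      let mid := blocks.length / 2
      let l := solveB strand ss se (blocks.take mid) off
      if l.2.1 then (l.1, true, l.2.2)
      else
        let r := solveB strand ss se (blocks.drop mid) (off + l.2.2)
        (l.1 ++ r.1, r.2.1, l.2.2 + r.2.2)
  termination_by blocks _ => blocks.length
  decreasing_by
    · simp [List.length_take]; omega
    · simp; omega

def map_spliced_to_genomic_py_alt (exon_blocks : List (Int × Int)) (strand : Int) (spliced_start : Int) (spliced_end : Int) : List (Int × Int) :=
  (solveB strand spliced_start spliced_end exon_blocks 0).1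

-- ===== PRECONDITION & SPEC =====
def Spec_map_spliced_to_genomic_py (exon_blocks : List (Int × Int)) (strand : Int) (spliced_start : Int) (spliced_end : Int) (out : List (Int × Int)) : Prop := out = map_spliced_to_genomic_py_alt exon_blocks strand spliced_start spliced_end
instance (exon_blocks : List (Int × Int)) (strand : Int) (spliced_start : Int) (spliced_end : Int) (out : List (Int × Int)) : Decidable (Spec_map_spliced_to_genomic_py exon_blocks strand spliced_start spliced_end out) := by unfold Spec_map_spliced_to_genomic_py; infer_instance

-- ===== CLAIM (what is proved, stated in full; the proofs are below) =====
def Claim_equal_map_spliced_to_genomic_py : Prop := ∀ (exon_blocks : List (Int × Int)) (strand : Int) (spliced_start : Int) (spliced_end : Int), Dom_map_spliced_to_genomic_py exon_blocks strand spliced_start spliced_end → Spec_map_spliced_to_genomic_py exon_blocks strand spliced_start spliced_end (map_spliced_to_genomic_py exon_blocks strand spliced_start spliced_end)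

-- ===== LEMMAS AND PROOFS =====

-- linear reference triple: A's loop enriched with the stop flag and consumed length
def linT (strand ss se : Int) : List (Int × Int) → Int → List (Int × Int) × Bool × Int
  | [], _ => ([], false, 0)
  | (g_start, g_end) :: rest, off =>
      let exon_len := g_end - g_start
      let a := max ss off
      let b := min se (off + exon_len)
      let segs : List (Int × Int) :=
        if a < b then
          if strand = -1 then [(g_end - (b - off), g_end - (a - off))]
          else [(g_start + (a - off), g_start + (b - off))]
        else []
      if se ≤ off + exon_len then (segs, true, exon_len)
      else
        let r := linT strand ss se rest (off + exon_len)
        (segs ++ r.1, r.2.1, exon_len + r.2.2)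

lemma loopA_eq_linT (strand ss se : Int) :
    ∀ (blocks : List (Int × Int)) (off : Int),
      mapSplicedLoopA blocks strand ss se off = (linT strand ss se blocks off).1 := by
  intro blocks
  induction blocks with
  | nil => intro off; rfl
  | cons hd rest ih =>
      intro off
      obtain ⟨gs, ge⟩ := hd
      simp only [mapSplicedLoopA, linT]
      split_ifs <;> simp [ih]

lemma linT_append (strand ss se : Int) :
    ∀ (xs ys : List (Int × Int)) (off : Int),
      linT strand ss se (xs ++ ys) off =
        (let l := linT strand ss se xs off;
         if l.2.1 then l
         else
           let r := linT strand ss se ys (off + l.2.2);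
           (l.1 ++ r.1, r.2.1, l.2.2 + r.2.2)) := by
  intro xs
  induction xs with
  | nil => intro ys off; simp [linT]
  | cons hd rest ih =>
      intro ys off
      obtain ⟨gs, ge⟩ := hd
      by_cases h : se ≤ off + (ge - gs)
      · simp [linT, h]
      · simp only [List.cons_append, linT, if_neg h, ih]
        by_cases hst : (linT strand ss se rest (off + (ge - gs))).2.1 = true
        · simp [hst]
        · simp [hst, add_assoc]

lemma solveB_eq_linT_aux (strand ss se : Int) :
    ∀ (n : Nat) (blocks : List (Int × Int)) (off : Int), blocks.length ≤ n →
      solveB strand ss se blocks off = linT strand ss se blocks off := by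
  intro n
  induction n with
  | zero =>
      intro blocks off h
      have hnil : blocks = [] := List.eq_nil_of_length_eq_zero (Nat.le_zero.mp h)
      subst hnil; simp [solveB, linT]
  | succ n ih =>
      intro blocks off h
      match blocks with
      | [] => simp [solveB, linT]
      | [(gs, ge)] =>
          by_cases hc : se ≤ off + (ge - gs) <;> simp [solveB, linT, hc]
      | p :: q :: rest =>
          rw [solveB]
          have hlen : (p :: q :: rest).length = rest.length + 2 := by simp
          have h1 : ((p :: q :: rest).take ((p :: q :: rest).length / 2)).length ≤ n := by
            simp only [List.length_take, hlen]
            simp only [hlen] at h; omega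
          have h2 : ((p :: q :: rest).drop ((p :: q :: rest).length / 2)).length ≤ n := by
            simp only [List.length_drop, hlen]
            simp only [hlen] at h; omega
          rw [ih _ off h1, ih _ _ h2]
          conv_rhs => rw [← List.take_append_drop ((p :: q :: rest).length / 2) (p :: q :: rest)]
          rw [linT_append]
          simp only [List.length_cons]
          by_cases hst : (linT strand ss se (List.take ((rest.length + 1 + 1) / 2) (p :: q :: rest)) off).2.1 = true
          · simp [hst, Prod.ext_iff]
          · simp [hst]

lemma solveB_eq_linT (strand ss se : Int) (blocks : List (Int × Int)) (off : Int) :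
    solveB strand ss se blocks off = linT strand ss se blocks off :=
  solveB_eq_linT_aux strand ss se blocks.length blocks off le_rfl

-- ===== VERDICT (by name: the statement is the Claim_ definition above) =====
theorem map_spliced_to_genomic_py_spec : Claim_equal_map_spliced_to_genomic_py := by
  intro blocks strand ss se _
  show _ = _
  unfold map_spliced_to_genomic_py map_spliced_to_genomic_py_alt
  rw [loopA_eq_linT, solveB_eq_linT]
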